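-- pv_equiv track=rewrite | github.com/yelloww809/project-ver-1-20260107 | about_model/model_system/bk/v7/sh0/inference_system.py | _get_slice_coords
-- ===== SOURCE A (Python) =====
-- SLICE_SIZE = 640
--
-- SLICE_OVERLAP = 0.2
--
-- def _get_slice_coords(img_h, img_w):
--     stride_h = int(SLICE_SIZE * (1 - SLICE_OVERLAP))
--     stride_w = int(SLICE_SIZE * (1 - SLICE_OVERLAP))
--     coords = []
--     for y in range(0, img_h, stride_h):
--         y_end = min(y + SLICE_SIZE, img_h)
--         if y >= img_h: continue
--         for x in range(0, img_w, stride_w):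
--             x_end = min(x + SLICE_SIZE, img_w)
--             if x >= img_w: continue
--             coords.append((y, y_end, x, x_end))
--             if x_end == img_w: break
--         if y_end == img_h: break
--     return coords
-- ===== SOURCE B (Python) =====
-- SLICE_SIZE = 640
--
-- SLICE_OVERLAP = 0.2
--
--
-- def _tile_1d(dim, stride):
--     spans = []
--     for start in range(0, dim, stride):
--         end = min(start + SLICE_SIZE, dim)
--         spans.append((start, end))
--         if end == dim:
--             break
--     return spans
--
--
-- def _get_slice_coords(img_h, img_w):
--     stride = int(SLICE_SIZE * (1 - SLICE_OVERLAP))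
--     ys = _tile_1d(img_h, stride)
--     xs = _tile_1d(img_w, stride)
--     return [(y, y_end, x, x_end) for (y, y_end) in ys for (x, x_end) in xs]
-- ===== Notes on version B (the rewrite author's own statement) =====
-- stated objective: simpler
-- what changed: Replaced the interdependent nested loops (with dead 'continue' guards and per-row break logic) by a 1D tiling helper applied once per dimension, combined by a cartesian product; each dimension's spans are computed once instead of re-deriving the column spans on every row.
import Mathlib
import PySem

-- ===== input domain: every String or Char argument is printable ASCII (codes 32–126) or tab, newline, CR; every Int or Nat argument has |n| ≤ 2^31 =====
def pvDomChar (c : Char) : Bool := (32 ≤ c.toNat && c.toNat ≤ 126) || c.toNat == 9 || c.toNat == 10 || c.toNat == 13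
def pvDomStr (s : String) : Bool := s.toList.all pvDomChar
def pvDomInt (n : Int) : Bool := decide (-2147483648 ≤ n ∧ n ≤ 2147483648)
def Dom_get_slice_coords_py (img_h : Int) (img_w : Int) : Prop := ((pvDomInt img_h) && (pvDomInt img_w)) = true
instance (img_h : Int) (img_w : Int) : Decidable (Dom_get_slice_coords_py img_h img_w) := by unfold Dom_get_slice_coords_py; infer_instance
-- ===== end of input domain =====

-- B replaces A's interdependent nested loops by one 1D tiling helper used per dimension, combined by a product (simpler decomposition; same cost).
-- ===== PORT A =====
-- inner 'for x in range(0, img_w, stride_w)' loop with its continue/break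
def pvAInner (img_w y y_end : Int) (xs : List Int) (acc : List (Int × Int × Int × Int)) : List (Int × Int × Int × Int) :=
  match xs with
  | [] => acc
  | x :: rest =>
    let x_end := min (x + 640) img_w
    if x ≥ img_w then pvAInner img_w y y_end rest acc
    else
      let acc' := acc ++ [(y, y_end, x, x_end)]
      if x_end = img_w then acc' else pvAInner img_w y y_end rest acc'

-- outer 'for y in range(0, img_h, stride_h)' loop with its continue/break
def pvAOuter (img_h img_w : Int) (ys : List Int) (acc : List (Int × Int × Int × Int)) : List (Int × Int × Int × Int) :=
  match ys with
  | [] => acc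
  | y :: rest =>
    let y_end := min (y + 640) img_h
    if y ≥ img_h then pvAOuter img_h img_w rest acc
    else
      let acc' := pvAInner img_w y y_end (PySem.List.pyRange 0 img_w 512) acc
      if y_end = img_h then acc' else pvAOuter img_h img_w rest acc'

def get_slice_coords_py (img_h : Int) (img_w : Int) : List (Int × Int × Int × Int) :=
  pvAOuter img_h img_w (PySem.List.pyRange 0 img_h 512) []

-- ===== PORT B =====
-- _tile_1d: walk the starts, stop as soon as a span's end reaches dim
def pvTile1d (dim : Int) (starts : List Int) : List (Int × Int) :=
  match starts with
  | [] => []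
  | s :: rest =>
    let e := min (s + 640) dim
    (s, e) :: (if e = dim then [] else pvTile1d dim rest)

def get_slice_coords_py_alt (img_h : Int) (img_w : Int) : List (Int × Int × Int × Int) :=
  let ys := pvTile1d img_h (PySem.List.pyRange 0 img_h 512)
  let xs := pvTile1d img_w (PySem.List.pyRange 0 img_w 512)
  ys.flatMap (fun p => xs.map (fun q => (p.1, p.2, q.1, q.2)))

-- ===== PRECONDITION & SPEC =====
def Spec_get_slice_coords_py (img_h : Int) (img_w : Int) (out : List (Int × Int × Int × Int)) : Prop := out = get_slice_coords_py_alt img_h img_w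
instance (img_h : Int) (img_w : Int) (out : List (Int × Int × Int × Int)) : Decidable (Spec_get_slice_coords_py img_h img_w out) := by unfold Spec_get_slice_coords_py; infer_instance

-- ===== CLAIM (what is proved, stated in full; the proofs are below) =====
def Claim_equal_get_slice_coords_py : Prop := ∀ (img_h : Int) (img_w : Int), Dom_get_slice_coords_py img_h img_w → Spec_get_slice_coords_py img_h img_w (get_slice_coords_py img_h img_w)

-- ===== LEMMAS AND PROOFS =====

-- every element of range(0, d, 512) is nonnegative and below d
lemma pv_mem_range512 {d x : Int} (hx : x ∈ PySem.List.pyRange 0 d 512) : 0 ≤ x ∧ x < d := by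
  have h := (PySem.List.mem_pyRange_iff_of_pos (by norm_num : (0:Int) < 512) x).mp hx
  exact ⟨h.1, h.2.1⟩

-- inner loop = product of a fixed row span with the 1D tiling of the width
lemma pvAInner_eq (img_w y y_end : Int) (xs : List Int)
    (hlt : ∀ x ∈ xs, x < img_w) (acc : List (Int × Int × Int × Int)) :
    pvAInner img_w y y_end xs acc
      = acc ++ (pvTile1d img_w xs).map (fun q => (y, y_end, q.1, q.2)) := by
  induction xs generalizing acc with
  | nil => simp [pvAInner, pvTile1d]
  | cons x rest ih =>
    have hx : x < img_w := hlt x (List.mem_cons_self ..)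
    have hrest : ∀ z ∈ rest, z < img_w := fun z hz => hlt z (List.mem_cons_of_mem _ hz)
    simp only [pvAInner, pvTile1d]
    rw [if_neg (by omega)]
    by_cases he : min (x + 640) img_w = img_w
    · simp [he]
    · simp only [if_neg he, ih hrest]
      simp

lemma pvAOuter_eq (img_h img_w : Int) (ys : List Int)
    (hlt : ∀ y ∈ ys, y < img_h) (acc : List (Int × Int × Int × Int)) :
    pvAOuter img_h img_w ys acc
      = acc ++ (pvTile1d img_h ys).flatMap
          (fun p => (pvTile1d img_w (PySem.List.pyRange 0 img_w 512)).map
            (fun q => (p.1, p.2, q.1, q.2))) := by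
  induction ys generalizing acc with
  | nil => simp [pvAOuter, pvTile1d]
  | cons y rest ih =>
    have hy : y < img_h := hlt y (List.mem_cons_self ..)
    have hrest : ∀ z ∈ rest, z < img_h := fun z hz => hlt z (List.mem_cons_of_mem _ hz)
    simp only [pvAOuter, pvTile1d]
    rw [if_neg (by omega)]
    rw [pvAInner_eq _ _ _ _ (fun x hx => (pv_mem_range512 hx).2) acc]
    by_cases he : min (y + 640) img_h = img_h
    · simp [he]
    · simp only [if_neg he, ih hrest]
      simp

-- ===== VERDICT (by name: the statement is the Claim_ definition above) =====
theorem get_slice_coords_py_spec : Claim_equal_get_slice_coords_py := by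
  intro img_h img_w _
  show get_slice_coords_py img_h img_w = get_slice_coords_py_alt img_h img_w
  unfold get_slice_coords_py get_slice_coords_py_alt
  rw [pvAOuter_eq _ _ _ (fun y hy => (pv_mem_range512 hy).2) []]
  simp
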